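-- pv_equiv track=rewrite | github.com/dtl184/IRL_ASP_Baseline | generate_data.py | get_legal_neighbors
-- ===== SOURCE A (Python) =====
-- PEGS = [1, 2, 3]
--
-- DISKS = [1, 2, 3]
--
-- def get_top_disk(state, peg):
--     disks_on_peg = [d for d in DISKS if state[d-1] == peg]
--     return min(disks_on_peg) if disks_on_peg else 99
--
-- def get_legal_neighbors(state):
--     neighbors = []
--     for from_peg in PEGS:
--         disk_to_move = get_top_disk(state, from_peg)
--         if disk_to_move == 99: continue
--
--         for to_peg in PEGS:
--             if from_peg == to_peg: continue
--
--             dest_top_disk = get_top_disk(state, to_peg)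
--             if disk_to_move < dest_top_disk:
--                 new_state = list(state)
--                 new_state[disk_to_move-1] = to_peg
--                 action = f"move({from_peg}, {to_peg})"
--                 neighbors.append((tuple(new_state), action))
--     return neighbors
-- ===== SOURCE B (Python) =====
-- PEGS = [1, 2, 3]
--
-- DISKS = [1, 2, 3]
--
-- def get_legal_neighbors(state):
--     # Hanoi rule: between an ordered pair of pegs (p, q), the only legal move is of
--     # the smallest disk located on either peg, and it is legal iff that disk is on p.
--     neighbors = []
--     for p, q in ((1, 2), (1, 3), (2, 1), (2, 3), (3, 1), (3, 2)):
--         m = None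
--         for d in (1, 2, 3):
--             if state[d - 1] == p or state[d - 1] == q:
--                 m = d
--                 break
--         if m is not None and state[m - 1] == p:
--             s = list(state)
--             s[m - 1] = q
--             neighbors.append((tuple(s), f"move({p}, {q})"))
--     return neighbors
-- ===== Notes on version B (the rewrite author's own statement) =====
-- stated objective: alternative
-- what changed: Replaces A's nested peg loops with per-peg min-scan tops and a top-vs-top comparison by a flat loop over the six ordered peg pairs using the Hanoi rule: the unique candidate move between pegs (p,q) is the smallest disk lying on either peg (first-match scan over disks), legal iff that disk is on p.
import Mathlib
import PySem

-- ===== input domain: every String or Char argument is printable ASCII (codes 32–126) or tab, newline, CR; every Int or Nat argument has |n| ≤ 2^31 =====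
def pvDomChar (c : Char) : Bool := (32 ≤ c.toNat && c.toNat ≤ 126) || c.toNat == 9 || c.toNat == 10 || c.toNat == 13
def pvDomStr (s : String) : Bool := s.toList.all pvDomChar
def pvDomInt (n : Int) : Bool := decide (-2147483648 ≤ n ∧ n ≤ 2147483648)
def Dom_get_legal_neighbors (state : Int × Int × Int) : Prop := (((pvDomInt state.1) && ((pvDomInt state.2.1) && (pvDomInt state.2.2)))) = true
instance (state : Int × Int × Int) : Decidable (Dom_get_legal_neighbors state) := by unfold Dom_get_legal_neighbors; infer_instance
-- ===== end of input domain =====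

-- B replaces A's nested peg loops with top-comparisons by a flat loop over the six ordered peg pairs using the smallest-disk-on-either-peg rule (alternative algorithm, same output).


-- ===== PORT A =====
-- tuple indexing / functional update for the fixed-size 3-tuple 'state' (exact for indices 0,1,2)
def pvTupGet (s : Int × Int × Int) (i : Int) : Int :=
  if i = 0 then s.1 else if i = 1 then s.2.1 else s.2.2

def pvTupSet (s : Int × Int × Int) (i : Int) (v : Int) : Int × Int × Int :=
  if i = 0 then (v, s.2.1, s.2.2) else if i = 1 then (s.1, v, s.2.2) else (s.1, s.2.1, v)

def pvDISKS : List Int := [1, 2, 3]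
def pvPEGS : List Int := [1, 2, 3]

def get_top_disk (state : Int × Int × Int) (peg : Int) : Int :=
  let disks_on_peg := pvDISKS.filter (fun d => pvTupGet state (d - 1) == peg)
  match PySem.List.min? disks_on_peg (fun x => x) with
  | some m => m
  | none => 99

def get_legal_neighbors (state : Int × Int × Int) : List ((Int × Int × Int) × String) :=
  pvPEGS.foldl (fun neighbors from_peg =>
    let disk_to_move := get_top_disk state from_peg
    if disk_to_move == 99 then neighbors else
    pvPEGS.foldl (fun acc to_peg =>
      if from_peg == to_peg then acc else
      let dest_top_disk := get_top_disk state to_peg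
      if disk_to_move < dest_top_disk then
        acc ++ [(pvTupSet state (disk_to_move - 1) to_peg,
                 "move(" ++ PySem.Int.toStr from_peg ++ ", " ++ PySem.Int.toStr to_peg ++ ")")]
      else acc) neighbors) []

-- ===== PORT B =====
def pvPairs : List (Int × Int) := [(1, 2), (1, 3), (2, 1), (2, 3), (3, 1), (3, 2)]

def get_legal_neighbors_alt (state : Int × Int × Int) : List ((Int × Int × Int) × String) :=
  pvPairs.foldl (fun neighbors pq =>
    let p := pq.1
    let q := pq.2
    -- first disk (smallest) lying on either peg, first-match scan over the disks
    let m := ([1, 2, 3] : List Int).find? (fun d =>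
      pvTupGet state (d - 1) == p || pvTupGet state (d - 1) == q)
    match m with
    | none => neighbors
    | some d =>
      if pvTupGet state (d - 1) == p then
        neighbors ++ [(pvTupSet state (d - 1) q,
                       "move(" ++ PySem.Int.toStr p ++ ", " ++ PySem.Int.toStr q ++ ")")]
      else neighbors) []

-- ===== PRECONDITION & SPEC =====
def Spec_get_legal_neighbors (state : Int × Int × Int) (out : List ((Int × Int × Int) × String)) : Prop := out = get_legal_neighbors_alt state
instance (state : Int × Int × Int) (out : List ((Int × Int × Int) × String)) : Decidable (Spec_get_legal_neighbors state out) := by unfold Spec_get_legal_neighbors; infer_instance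

-- ===== CLAIM (what is proved, stated in full; the proofs are below) =====
def Claim_equal_get_legal_neighbors : Prop := ∀ (state : Int × Int × Int), Dom_get_legal_neighbors state → Spec_get_legal_neighbors state (get_legal_neighbors state)

-- ===== LEMMAS AND PROOFS =====
theorem pv_int_cases3 (x : Int) :
    x = 1 ∨ x = 2 ∨ x = 3 ∨
      ((x == 1) = false ∧ (x == 2) = false ∧ (x == 3) = false) := by
  by_cases h1 : x = 1
  · exact Or.inl h1
  · by_cases h2 : x = 2
    · exact Or.inr (Or.inl h2)
    · by_cases h3 : x = 3
      · exact Or.inr (Or.inr (Or.inl h3))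
      · exact Or.inr (Or.inr (Or.inr ⟨by simp [h1], by simp [h2], by simp [h3]⟩))

-- ===== VERDICT (by name: the statement is the Claim_ definition above) =====
set_option maxHeartbeats 4000000 in
theorem get_legal_neighbors_spec : Claim_equal_get_legal_neighbors := by
  intro state _
  obtain ⟨a, b, c⟩ := state
  unfold Spec_get_legal_neighbors
  rcases pv_int_cases3 a with ha | ha | ha | ⟨ha1, ha2, ha3⟩ <;>
  rcases pv_int_cases3 b with hb | hb | hb | ⟨hb1, hb2, hb3⟩ <;>
  rcases pv_int_cases3 c with hc | hc | hc | ⟨hc1, hc2, hc3⟩ <;>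
  subst_vars <;>
  first
  | decide
  | simp [get_legal_neighbors, get_legal_neighbors_alt, get_top_disk, pvTupGet, pvTupSet,
      pvDISKS, pvPEGS, pvPairs, PySem.List.min?, List.filter, List.find?, *]
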